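-- pv_equiv track=rewrite | github.com/Dregxmoon/Proyecto-Automatas | traductor.py | parse
-- ===== SOURCE A (Python) =====
-- def parse(lines_tokens):
--     """
--     Gramática:
--       programa     → INICIO instrucciones FIN
--       instrucciones → instruccion+
--       instruccion  → AVANZAR TK_NUMERO
--                    | GIRAR DERECHA
--                    | GIRAR IZQUIERDA
--                    | DETENER
--     Retorna (es_valido, mensaje)
--     """
--     tokens = []
--     for _, toks in lines_tokens:
--         tokens.extend(toks)
--
--     def expect(i, tipo):
--         if i < len(tokens) and tokens[i][0] == tipo:
--             return i + 1
--         tok = tokens[i] if i < len(tokens) else ('EOF', 'EOF')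
--         raise SyntaxError(f"Se esperaba '{tipo}' pero se encontró '{tok[1]}'")
--
--     try:
--         i = expect(0, 'TK_INICIO')
--         if i >= len(tokens) or tokens[i][0] == 'TK_FIN':
--             raise SyntaxError("El programa no contiene instrucciones.")
--
--         while i < len(tokens) and tokens[i][0] != 'TK_FIN':
--             tipo = tokens[i][0]
--             if tipo == 'TK_AVANZAR':
--                 i += 1
--                 i = expect(i, 'TK_NUMERO')
--             elif tipo == 'TK_GIRAR':
--                 i += 1
--                 if i < len(tokens) and tokens[i][0] in ('TK_DERECHA', 'TK_IZQUIERDA'):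
--                     i += 1
--                 else:
--                     tok = tokens[i] if i < len(tokens) else ('EOF', 'EOF')
--                     raise SyntaxError(f"GIRAR debe ir seguido de DERECHA o IZQUIERDA, se encontró '{tok[1]}'")
--             elif tipo == 'TK_DETENER':
--                 i += 1
--             else:
--                 raise SyntaxError(f"Instrucción no reconocida: '{tokens[i][1]}'")
--
--         i = expect(i, 'TK_FIN')
--         if i != len(tokens):
--             raise SyntaxError("Se encontraron tokens adicionales después de FIN.")
--         return True, "Programa válido ✓"
--     except SyntaxError as e:
--         return False, f"Error sintáctico: {e}"
-- ===== SOURCE B (Python) =====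
-- def parse(lines_tokens):
--     """FSM re-implementation: flatten tokens, then walk them once with an
--     explicit state variable instead of A's exception-driven expect/while code."""
--     toks = [t for _, ts in lines_tokens for t in ts]
--     n = len(toks)
--
--     def val(i):
--         return toks[i][1] if i < n else 'EOF'
--
--     state = 'START'
--     i = 0
--     err = None
--     while err is None:
--         if state == 'START':
--             if i < n and toks[i][0] == 'TK_INICIO':
--                 state = 'FIRST'
--                 i += 1
--             else:
--                 err = f"Se esperaba 'TK_INICIO' pero se encontró '{val(i)}'"
--         elif state == 'FIRST':
--             if i >= n or toks[i][0] == 'TK_FIN':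
--                 err = "El programa no contiene instrucciones."
--             else:
--                 state = 'BODY'
--         elif state == 'BODY':
--             if i >= n:
--                 err = "Se esperaba 'TK_FIN' pero se encontró 'EOF'"
--             else:
--                 t = toks[i][0]
--                 if t == 'TK_FIN':
--                     if i + 1 != n:
--                         err = "Se encontraron tokens adicionales después de FIN."
--                     else:
--                         return True, "Programa válido ✓"
--                 elif t == 'TK_AVANZAR':
--                     state = 'NUM'
--                     i += 1
--                 elif t == 'TK_GIRAR':
--                     state = 'DIR'
--                     i += 1
--                 elif t == 'TK_DETENER':
--                     i += 1
--                 else: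
--                     err = f"Instrucción no reconocida: '{toks[i][1]}'"
--         elif state == 'NUM':
--             if i < n and toks[i][0] == 'TK_NUMERO':
--                 state = 'BODY'
--                 i += 1
--             else:
--                 err = f"Se esperaba 'TK_NUMERO' pero se encontró '{val(i)}'"
--         elif state == 'DIR':
--             if i < n and toks[i][0] in ('TK_DERECHA', 'TK_IZQUIERDA'):
--                 state = 'BODY'
--                 i += 1
--             else:
--                 err = f"GIRAR debe ir seguido de DERECHA o IZQUIERDA, se encontró '{val(i)}'"
--     return False, f"Error sintáctico: {err}"
-- ===== Notes on version B (the rewrite author's own statement) =====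
-- stated objective: alternative
-- what changed: Replaced A's exception-driven recursive-descent check (expect helper, while loop, try/except) with a single explicit finite-state machine that walks the flattened token list once, dispatching on (state, current token) and accumulating the error message instead of raising.
import Mathlib
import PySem

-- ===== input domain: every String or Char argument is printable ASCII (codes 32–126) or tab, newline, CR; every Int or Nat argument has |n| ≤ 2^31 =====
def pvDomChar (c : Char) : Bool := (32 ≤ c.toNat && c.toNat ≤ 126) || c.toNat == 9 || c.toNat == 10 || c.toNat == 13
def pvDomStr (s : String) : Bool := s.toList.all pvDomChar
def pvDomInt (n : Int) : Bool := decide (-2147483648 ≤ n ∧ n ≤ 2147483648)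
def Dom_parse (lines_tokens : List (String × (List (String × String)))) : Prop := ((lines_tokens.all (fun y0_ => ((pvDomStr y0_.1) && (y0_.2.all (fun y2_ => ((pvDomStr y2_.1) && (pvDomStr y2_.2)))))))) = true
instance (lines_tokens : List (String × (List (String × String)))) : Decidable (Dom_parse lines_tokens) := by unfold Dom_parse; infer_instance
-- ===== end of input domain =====

-- ===== PORT A =====
-- B re-implements A's exception-driven recursive-descent check as an explicit finite-state machine (alternative decomposition).
-- tokens.extend in a loop:
def pvFlatten (lines_tokens : List (String × (List (String × String)))) : List (String × String) :=
  lines_tokens.foldl (fun acc p => acc ++ p.2) []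

-- A's helper `expect`: .ok (i+1) on match, .error message otherwise (SyntaxError).
def pvExpect (tokens : List (String × String)) (i : Nat) (tipo : String) : Except String Nat :=
  if i < tokens.length ∧ (tokens.getD i ("", "")).1 = tipo then .ok (i + 1)
  else .error ("Se esperaba '" ++ tipo ++ "' pero se encontró '" ++
      (if i < tokens.length then tokens.getD i ("", "") else ("EOF", "EOF")).2 ++ "'")

-- A's while loop; on success `expect` always returns its argument + 1, so the AVANZAR/GIRAR
-- branches continue at i+2 exactly as the Python does.
def pvLoopA (tokens : List (String × String)) (i : Nat) : Except String Nat :=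
  if h : i < tokens.length ∧ (tokens.getD i ("", "")).1 ≠ "TK_FIN" then
    let tipo := (tokens.getD i ("", "")).1
    if tipo = "TK_AVANZAR" then
      match pvExpect tokens (i + 1) "TK_NUMERO" with
      | .error e => .error e
      | .ok _ => pvLoopA tokens (i + 2)
    else if tipo = "TK_GIRAR" then
      if i + 1 < tokens.length ∧ ((tokens.getD (i + 1) ("", "")).1 = "TK_DERECHA" ∨
          (tokens.getD (i + 1) ("", "")).1 = "TK_IZQUIERDA") then
        pvLoopA tokens (i + 2)
      else
        .error ("GIRAR debe ir seguido de DERECHA o IZQUIERDA, se encontró '" ++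
          (if i + 1 < tokens.length then tokens.getD (i + 1) ("", "") else ("EOF", "EOF")).2 ++ "'")
    else if tipo = "TK_DETENER" then pvLoopA tokens (i + 1)
    else .error ("Instrucción no reconocida: '" ++ (tokens.getD i ("", "")).2 ++ "'")
  else .ok i
termination_by tokens.length - i
decreasing_by all_goals omega

def parse (lines_tokens : List (String × (List (String × String)))) : Bool × String :=
  let tokens := pvFlatten lines_tokens
  match pvExpect tokens 0 "TK_INICIO" with
  | .error e => (false, "Error sintáctico: " ++ e)
  | .ok i =>
    if i ≥ tokens.length ∨ (tokens.getD i ("", "")).1 = "TK_FIN" then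
      (false, "Error sintáctico: " ++ "El programa no contiene instrucciones.")
    else
      match pvLoopA tokens i with
      | .error e => (false, "Error sintáctico: " ++ e)
      | .ok j =>
        match pvExpect tokens j "TK_FIN" with
        | .error e => (false, "Error sintáctico: " ++ e)
        | .ok k =>
          if k ≠ tokens.length then
            (false, "Error sintáctico: " ++ "Se encontraron tokens adicionales después de FIN.")
          else (true, "Programa válido ✓")

-- ===== PORT B =====
inductive PvState : Type
  | start | first | body | num | dir
deriving DecidableEq, Repr

def pvVal (tokens : List (String × String)) (i : Nat) : String :=
  if i < tokens.length then (tokens.getD i ("", "")).2 else "EOF"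

-- B's while loop: one FSM step per token; errors come back bare (false, err),
-- success returns (true, msg) directly, mirroring Source B's `err` variable / early return.
def pvLoopB (tokens : List (String × String)) (st : PvState) (i : Nat) : Bool × String :=
  match st with
  | .start =>
    if h : i < tokens.length ∧ (tokens.getD i ("", "")).1 = "TK_INICIO" then
      pvLoopB tokens .first (i + 1)
    else (false, "Se esperaba 'TK_INICIO' pero se encontró '" ++ pvVal tokens i ++ "'")
  | .first =>
    if i ≥ tokens.length ∨ (tokens.getD i ("", "")).1 = "TK_FIN" then
      (false, "El programa no contiene instrucciones.")
    else pvLoopB tokens .body i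
  | .body =>
    if h : i ≥ tokens.length then
      (false, "Se esperaba 'TK_FIN' pero se encontró 'EOF'")
    else
      let t := (tokens.getD i ("", "")).1
      if t = "TK_FIN" then
        if i + 1 ≠ tokens.length then
          (false, "Se encontraron tokens adicionales después de FIN.")
        else (true, "Programa válido ✓")
      else if t = "TK_AVANZAR" then pvLoopB tokens .num (i + 1)
      else if t = "TK_GIRAR" then pvLoopB tokens .dir (i + 1)
      else if t = "TK_DETENER" then pvLoopB tokens .body (i + 1)
      else (false, "Instrucción no reconocida: '" ++ (tokens.getD i ("", "")).2 ++ "'")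
  | .num =>
    if h : i < tokens.length ∧ (tokens.getD i ("", "")).1 = "TK_NUMERO" then
      pvLoopB tokens .body (i + 1)
    else (false, "Se esperaba 'TK_NUMERO' pero se encontró '" ++ pvVal tokens i ++ "'")
  | .dir =>
    if h : i < tokens.length ∧ ((tokens.getD i ("", "")).1 = "TK_DERECHA" ∨
        (tokens.getD i ("", "")).1 = "TK_IZQUIERDA") then
      pvLoopB tokens .body (i + 1)
    else (false, "GIRAR debe ir seguido de DERECHA o IZQUIERDA, se encontró '" ++ pvVal tokens i ++ "'")
termination_by ((tokens.length + 1 - i) * 2, match st with | .first => 1 | _ => 0)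
decreasing_by all_goals simp_wf <;> omega

def parse_alt (lines_tokens : List (String × (List (String × String)))) : Bool × String :=
  let toks := lines_tokens.flatMap (fun p => p.2)
  match pvLoopB toks .start 0 with
  | (true, m) => (true, m)
  | (false, e) => (false, "Error sintáctico: " ++ e)

-- ===== PRECONDITION & SPEC =====
def Spec_parse (lines_tokens : List (String × (List (String × String)))) (out : Bool × String) : Prop := out = parse_alt lines_tokens
instance (lines_tokens : List (String × (List (String × String)))) (out : Bool × String) : Decidable (Spec_parse lines_tokens out) := by unfold Spec_parse; infer_instance

-- ===== CLAIM (what is proved, stated in full; the proofs are below) =====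
def Claim_equal_parse : Prop := ∀ (lines_tokens : List (String × (List (String × String)))), Dom_parse lines_tokens → Spec_parse lines_tokens (parse lines_tokens)

-- ===== LEMMAS AND PROOFS =====

-- literal string-concatenation facts (A builds messages from a `tipo` parameter, B writes the prefix literally)
lemma pvPreIni : "Se esperaba '" ++ "TK_INICIO" ++ "' pero se encontró '" = "Se esperaba 'TK_INICIO' pero se encontró '" := by decide
lemma pvPreNum : "Se esperaba '" ++ "TK_NUMERO" ++ "' pero se encontró '" = "Se esperaba 'TK_NUMERO' pero se encontró '" := by decide
lemma pvPreFin : "Se esperaba '" ++ "TK_FIN" ++ "' pero se encontró '" = "Se esperaba 'TK_FIN' pero se encontró '" := by decide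

-- A's loop followed by `expect FIN` and the trailing check equals B's FSM in state .body.
lemma body_eq (tokens : List (String × String)) :
    ∀ k i, tokens.length - i ≤ k →
    pvLoopB tokens .body i =
      (match pvLoopA tokens i with
       | .error e => (false, e)
       | .ok j =>
         match pvExpect tokens j "TK_FIN" with
         | .error e => (false, e)
         | .ok m =>
           if m ≠ tokens.length then (false, "Se encontraron tokens adicionales después de FIN.")
           else (true, "Programa válido ✓")) := by
  intro k
  induction k with
  | zero =>
    intro i hi
    have hin : tokens.length ≤ i := by omega
    rw [pvLoopB, pvLoopA]
    simp [pvExpect, Nat.not_lt.mpr hin, hin, pvPreFin]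
  | succ k ih =>
    intro i hi
    by_cases hin : tokens.length ≤ i
    · rw [pvLoopB, pvLoopA]
      simp [pvExpect, Nat.not_lt.mpr hin, hin, pvPreFin]
    · have hlt : i < tokens.length := by omega
      have ih1 := ih (i + 1) (by omega)
      have ih2 := ih (i + 1 + 1) (by omega)
      rw [pvLoopB, pvLoopA]
      by_cases hfin : tokens[i].1 = "TK_FIN"
      · simp [pvExpect, List.getD_eq_getElem?_getD, hfin, hlt, Nat.not_le.mpr hlt]
      · by_cases hav : tokens[i].1 = "TK_AVANZAR"
        · have e2 : i + 1 + 1 = i + 2 := by omega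
          have ih2' := ih (i + 2) (by omega)
          by_cases hn1 : i + 1 < tokens.length
          · by_cases hn2 : tokens[i + 1].1 = "TK_NUMERO"
            · simp only [List.getD_eq_getElem?_getD] at *
              simp [pvExpect, List.getD_eq_getElem?_getD, hfin, hav, hlt, Nat.not_le.mpr hlt,
                hn1, hn2]
              rw [pvLoopB]
              simp [pvExpect, List.getD_eq_getElem?_getD, hn1, hn2, e2, ih2']
            · simp [pvExpect, List.getD_eq_getElem?_getD, hfin, hav, hlt, Nat.not_le.mpr hlt,
                hn1, hn2, pvPreNum, apply_ite, pvVal]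
              rw [pvLoopB]
              simp [pvVal, apply_ite, List.getD_eq_getElem?_getD, hn1, hn2, pvPreNum]
          · simp [pvExpect, List.getD_eq_getElem?_getD, hfin, hav, hlt, Nat.not_le.mpr hlt,
              hn1, pvPreNum, apply_ite, pvVal]
            rw [pvLoopB]
            simp [pvVal, apply_ite, List.getD_eq_getElem?_getD, hn1, pvPreNum]
        · by_cases hgir : tokens[i].1 = "TK_GIRAR"
          · have e2 : i + 1 + 1 = i + 2 := by omega
            have ih2' := ih (i + 2) (by omega)
            by_cases hd1 : i + 1 < tokens.length
            · by_cases hd2 : tokens[i + 1].1 = "TK_DERECHA" ∨ tokens[i + 1].1 = "TK_IZQUIERDA"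
              · simp [List.getD_eq_getElem?_getD, hfin, hav, hgir, hlt, Nat.not_le.mpr hlt,
                  hd1, hd2]
                rw [pvLoopB]
                simp [List.getD_eq_getElem?_getD, hd1, hd2, e2, ih2']
              · simp [pvVal, apply_ite, List.getD_eq_getElem?_getD, hfin, hav, hgir, hlt,
                  Nat.not_le.mpr hlt, hd1, hd2]
                rw [pvLoopB]
                simp [pvVal, apply_ite, List.getD_eq_getElem?_getD, hd1, hd2]
            · simp [pvVal, apply_ite, List.getD_eq_getElem?_getD, hfin, hav, hgir, hlt,
                Nat.not_le.mpr hlt, hd1]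
              rw [pvLoopB]
              simp [pvVal, apply_ite, List.getD_eq_getElem?_getD, hd1]
          · by_cases hdet : tokens[i].1 = "TK_DETENER"
            · simp [List.getD_eq_getElem?_getD, hfin, hav, hgir, hdet, hlt, Nat.not_le.mpr hlt, ih1]
            · simp [List.getD_eq_getElem?_getD, hfin, hav, hgir, hdet, hlt, Nat.not_le.mpr hlt]

lemma parse_eq (lines_tokens : List (String × (List (String × String)))) :
    parse lines_tokens = parse_alt lines_tokens := by
  unfold parse parse_alt pvFlatten
  rw [PySem.List.foldl_append_eq_flatMap]
  simp only [List.nil_append]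
  generalize (lines_tokens.flatMap fun p => p.2) = tokens
  rw [pvLoopB]
  by_cases hl0 : 0 < tokens.length
  · by_cases h0 : tokens[0].1 = "TK_INICIO"
    · rw [pvLoopB]
      by_cases h1a : tokens.length ≤ 1
      · simp [pvExpect, List.getD_eq_getElem?_getD, hl0, h0, h1a]
      · have h1l : 1 < tokens.length := by omega
        by_cases h1b : tokens[1].1 = "TK_FIN"
        · simp [pvExpect, List.getD_eq_getElem?_getD, hl0, h0, h1a, h1l, h1b]
        · rw [body_eq tokens (tokens.length - 1) 1 (le_refl _)]
          have hIni : pvExpect tokens 0 "TK_INICIO" = Except.ok 1 := by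
            simp [pvExpect, List.getD_eq_getElem?_getD, hl0, h0]
          rcases hA : pvLoopA tokens 1 with e | j
          · simp [hIni, hA, List.getD_eq_getElem?_getD, hl0, h0, h1a, h1l, h1b]
          · rcases hE : pvExpect tokens j "TK_FIN" with e | m
            · simp [hIni, hA, hE, List.getD_eq_getElem?_getD, hl0, h0, h1a, h1l, h1b]
            · by_cases hm : m = tokens.length
              · simp [hIni, hA, hE, hm, List.getD_eq_getElem?_getD, hl0, h0, h1a, h1l, h1b]
              · simp [hIni, hA, hE, hm, List.getD_eq_getElem?_getD, hl0, h0, h1a, h1l, h1b]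
    · simp [pvExpect, pvVal, apply_ite, List.getD_eq_getElem?_getD, hl0, h0, pvPreIni]
  · simp [pvExpect, pvVal, apply_ite, List.getD_eq_getElem?_getD, hl0, pvPreIni]

-- ===== VERDICT (by name: the statement is the Claim_ definition above) =====
theorem parse_spec : Claim_equal_parse := by
  intro lines_tokens _
  unfold Spec_parse
  exact parse_eq lines_tokens
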